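-- pv_equiv track=rewrite | github.com/iwavelet1/vectorGen | daily_alerts_splitter/splitter.py | segments_from_edges
-- ===== SOURCE A (Python) =====
-- def segments_from_edges(bars: list[dict], edge_ix: list[int]) -> list[list[dict]]:
--     """Build segments: a segment runs from an edge bar until the next edge where
--     revDir != 0 and revDir != starting revDir (closing edge). If revDir == start_dir
--     it is the same edge (same direction), so we do not close there.
--     """
--     if not edge_ix:
--         return [bars] if bars else []
--     segments = []
--     k = 0
--     while k < len(edge_ix):
--         start_ix = edge_ix[k]
--         start_dir = _rev_dir(bars[start_ix])
--         end_ix = start_ix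
--         for j in range(k + 1, len(edge_ix)):
--             if _rev_dir(bars[edge_ix[j]]) != start_dir:
--                 end_ix = edge_ix[j]
--                 break
--         else:
--             end_ix = len(bars) - 1
--         segments.append(bars[start_ix : end_ix + 1])
--         if end_ix == start_ix:
--             k += 1
--         else:
--             for j in range(k + 1, len(edge_ix)):
--                 if edge_ix[j] == end_ix:
--                     k = j
--                     break
--             else:
--                 # Ran to end of bars (no opposite edge found); don't start a new segment at next same-dir edge
--                 k = len(edge_ix)
--     return segments
--
-- def _rev_dir(bar: dict) -> int | None:
--     """revDir as int (1 or -1) or None if missing/invalid."""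
--     r = bar.get("revDir")
--     if r is None:
--         return None
--     try:
--         v = int(r)
--         return v if v in (1, -1) else None
--     except (TypeError, ValueError):
--         return None
-- ===== SOURCE B (Python) =====
-- def segments_from_edges(bars: list[dict], edge_ix: list[int]) -> list[list[dict]]:
--     """Two passes: compress edge_ix to its direction-change boundaries, then cut
--     one segment per consecutive boundary pair and a final segment to the end."""
--     if not edge_ix:
--         return [bars] if bars else []
--     boundaries = [edge_ix[0]]
--     cur = _rev_dir(bars[edge_ix[0]])
--     for e in edge_ix[1:]:
--         d = _rev_dir(bars[e])
--         if d != cur: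
--             boundaries.append(e)
--             cur = d
--     segments = [bars[a:b + 1] for a, b in zip(boundaries, boundaries[1:])]
--     segments.append(bars[boundaries[-1]:])
--     return segments
--
-- def _rev_dir(bar: dict):
--     r = bar.get("revDir")
--     if r is None:
--         return None
--     try:
--         v = int(r)
--         return v if v in (1, -1) else None
--     except (TypeError, ValueError):
--         return None
-- ===== Notes on version B (the rewrite author's own statement) =====
-- stated objective: simpler
-- what changed: A's while-loop re-scans the remaining edges from each position to find the segment end and then again to find where to resume; B does one compression pass reducing edge_ix to its direction-change boundaries and then cuts one segment per consecutive boundary pair plus a final segment running to the end of bars.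
-- intended difference: On inputs whose trailing run of same-direction edges has length >= 2 and contains the index len(bars)-1, A's resume-search re-enters at that last-bar edge and emits extra duplicate single-bar/suffix segments after the final segment, contradicting its own comment 'don't start a new segment at next same-dir edge'; B emits exactly one final segment from the last boundary to the end, which is the intended behaviour. — e.g. on segments_from_edges([[("revDir", 1)], [("revDir", 1)]], [0, 1]): A returns [[[("revDir", 1)], [("revDir", 1)]], [[("revDir", 1)]]], B returns [[[("revDir", 1)], [("revDir", 1)]]]
import Mathlib
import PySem

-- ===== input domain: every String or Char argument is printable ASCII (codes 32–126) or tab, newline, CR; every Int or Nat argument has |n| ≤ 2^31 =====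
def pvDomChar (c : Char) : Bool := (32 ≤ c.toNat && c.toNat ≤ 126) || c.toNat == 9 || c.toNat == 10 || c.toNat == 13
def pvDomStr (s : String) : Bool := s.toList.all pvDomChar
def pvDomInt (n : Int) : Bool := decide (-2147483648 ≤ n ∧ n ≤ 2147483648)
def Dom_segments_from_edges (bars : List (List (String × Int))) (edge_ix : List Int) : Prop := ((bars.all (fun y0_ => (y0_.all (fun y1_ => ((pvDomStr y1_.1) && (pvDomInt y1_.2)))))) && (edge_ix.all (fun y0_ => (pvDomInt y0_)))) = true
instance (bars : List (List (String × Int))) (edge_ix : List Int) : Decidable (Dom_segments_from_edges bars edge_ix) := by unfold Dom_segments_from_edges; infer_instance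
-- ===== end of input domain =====

-- B compresses edge_ix to its direction-change boundaries in one pass and cuts one segment per
-- boundary pair plus a final segment to the end (objective: simpler); where A's resume-search
-- quirk emits extra trailing duplicate segments, B intentionally differs (see D_ below).

-- shared helper: _rev_dir (identical in both Python sources)
def pvRevDir (bar : List (String × Int)) : Option Int :=
  match (PySem.Dict.mk bar).get? "revDir" with
  | none => none
  | some v => if v = 1 ∨ v = -1 then some v else none

-- bars[e] then _rev_dir; returns none where Python would raise IndexError (excluded by Pre_)
def pvRdAt (bars : List (List (String × Int))) (e : Int) : Option Int :=
  match PySem.List.pyGet? bars e with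
  | none => none
  | some b => pvRevDir b

-- ===== PORT A =====
-- inner 'for j in range(k+1, …): if _rev_dir(bars[edge_ix[j]]) != start_dir: … break / else:'
def aFindEnd (bars : List (List (String × Int))) (es : List Int) (startDir : Option Int) : Option Int :=
  match es with
  | [] => none
  | e :: rest => if pvRdAt bars e ≠ startDir then some e else aFindEnd bars rest startDir

-- second 'for j …: if edge_ix[j] == end_ix: k = j; break / else: k = len(edge_ix)' as the suffix from the new k
def aNextK (es : List Int) (target : Int) : List Int :=
  match es with
  | [] => []
  | x :: rest => if x = target then x :: rest else aNextK rest target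

theorem aNextK_length_le (es : List Int) (t : Int) : (aNextK es t).length ≤ es.length := by
  induction es with
  | nil => simp [aNextK]
  | cons x rest ih =>
    simp only [aNextK]
    split
    · simp
    · exact Nat.le_succ_of_le ih

-- the 'while k < len(edge_ix)' loop, state = edge_ix[k:]
def aLoop (bars : List (List (String × Int))) (es : List Int) : List (List (List (String × Int))) :=
  match es with
  | [] => []
  | e :: rest =>
    match aFindEnd bars rest (pvRdAt bars e) with
    | some v =>
      if v = e then
        PySem.List.slice bars (some e) (some (v + 1)) :: aLoop bars rest
      else
        PySem.List.slice bars (some e) (some (v + 1)) :: aLoop bars (aNextK rest v)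
    | none =>
      if PySem.List.len bars - 1 = e then
        PySem.List.slice bars (some e) (some (PySem.List.len bars - 1 + 1)) :: aLoop bars rest
      else
        PySem.List.slice bars (some e) (some (PySem.List.len bars - 1 + 1)) ::
          aLoop bars (aNextK rest (PySem.List.len bars - 1))
termination_by es.length
decreasing_by
  · simp
  · simp only [List.length_cons]; exact Nat.lt_succ_of_le (aNextK_length_le _ _)
  · simp
  · simp only [List.length_cons]; exact Nat.lt_succ_of_le (aNextK_length_le _ _)

def segments_from_edges (bars : List (List (String × Int))) (edge_ix : List Int) : List (List (List (String × Int))) :=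
  match edge_ix with
  | [] => if bars ≠ [] then [bars] else []
  | es => aLoop bars es

-- ===== PORT B =====
-- the compression pass: boundaries / cur accumulators of Source B's for-loop
def bScan (bars : List (List (String × Int))) (es : List Int) (cur : Option Int)
    (bnds : List Int) : List Int :=
  match es with
  | [] => bnds
  | e :: rest =>
    if pvRdAt bars e ≠ cur then bScan bars rest (pvRdAt bars e) (bnds ++ [e])
    else bScan bars rest cur bnds

-- '[bars[a:b+1] for a, b in zip(boundaries, boundaries[1:])]'
def bPairs (bars : List (List (String × Int))) (bnds : List Int) : List (List (List (String × Int))) :=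
  (bnds.zip bnds.tail).map (fun p => PySem.List.slice bars (some p.1) (some (p.2 + 1)))

def segments_from_edges_alt (bars : List (List (String × Int))) (edge_ix : List Int) : List (List (List (String × Int))) :=
  match edge_ix with
  | [] => if bars ≠ [] then [bars] else []
  | e0 :: rest =>
    let bnds := bScan bars rest (pvRdAt bars e0) [e0]
    bPairs bars bnds ++ [PySem.List.slice bars (some (PySem.List.pyGetD bnds (-1) 0)) none]

-- ===== PRECONDITION & SPEC =====
-- exactly the inputs where Python A returns: every element of edge_ix is an in-range index of bars
-- (A eventually evaluates bars[e] for every e in edge_ix, raising IndexError otherwise)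
def Pre_segments_from_edges (bars : List (List (String × Int))) (edge_ix : List Int) : Prop :=
  ∀ e ∈ edge_ix, PySem.Raise.InRange bars.length e
instance (bars : List (List (String × Int))) (edge_ix : List Int) : Decidable (Pre_segments_from_edges bars edge_ix) := by unfold Pre_segments_from_edges; infer_instance

def pvWitness_segments_from_edges : (List (List (String × Int))) × List Int :=
  ([[("revDir", 1)], [("revDir", -1)]], [0, 1])

-- the trailing maximal run of edges with constant _rev_dir (a fold over the input, no port code)
def lastRunStep (bars : List (List (String × Int))) (acc : List Int) (e : Int) : List Int :=
  match acc with
  | [] => [e]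
  | a :: _ => if pvRdAt bars e = pvRdAt bars a then acc ++ [e] else [e]

def lastRun (bars : List (List (String × Int))) (es : List Int) : List Int :=
  es.foldl (lastRunStep bars) []

-- On inputs whose trailing run of same-direction edges has length ≥ 2 and contains len(bars)-1,
-- A's resume-search re-enters at that last-bar edge and appends extra duplicate segments after
-- the final segment (against its own comment "don't start a new segment at next same-dir edge");
-- B returns exactly one final segment from the last boundary to the end — the intended value.
def D_segments_from_edges (bars : List (List (String × Int))) (edge_ix : List Int) : Prop :=
  2 ≤ (lastRun bars edge_ix).length ∧ (PySem.List.len bars - 1) ∈ lastRun bars edge_ix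
instance (bars : List (List (String × Int))) (edge_ix : List Int) : Decidable (D_segments_from_edges bars edge_ix) := by unfold D_segments_from_edges; infer_instance

def Spec_segments_from_edges (bars : List (List (String × Int))) (edge_ix : List Int) (out : List (List (List (String × Int)))) : Prop := ¬ D_segments_from_edges bars edge_ix → out = segments_from_edges_alt bars edge_ix
instance (bars : List (List (String × Int))) (edge_ix : List Int) (out : List (List (List (String × Int)))) : Decidable (Spec_segments_from_edges bars edge_ix out) := by unfold Spec_segments_from_edges; infer_instance

def pvDiffWitness_segments_from_edges : (List (List (String × Int))) × List Int :=
  ([[("revDir", 1)], [("revDir", 1)]], [0, 1])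

def pvDiffWitnessOut_segments_from_edges : (List (List (List (String × Int)))) × (List (List (List (String × Int)))) :=
  ([[[("revDir", 1)], [("revDir", 1)]], [[("revDir", 1)]]],
   [[[("revDir", 1)], [("revDir", 1)]]])

-- ===== CLAIM (what is proved, stated in full; the proofs are below) =====
def Claim_unchanged_segments_from_edges : Prop := ∀ (bars : List (List (String × Int))) (edge_ix : List Int), Dom_segments_from_edges bars edge_ix → Pre_segments_from_edges bars edge_ix → Spec_segments_from_edges bars edge_ix (segments_from_edges bars edge_ix)
def Claim_changed_segments_from_edges : Prop := Dom_segments_from_edges (pvDiffWitness_segments_from_edges.1) (pvDiffWitness_segments_from_edges.2) ∧ Pre_segments_from_edges (pvDiffWitness_segments_from_edges.1) (pvDiffWitness_segments_from_edges.2) ∧ D_segments_from_edges (pvDiffWitness_segments_from_edges.1) (pvDiffWitness_segments_from_edges.2) ∧ segments_from_edges (pvDiffWitness_segments_from_edges.1) (pvDiffWitness_segments_from_edges.2) = pvDiffWitnessOut_segments_from_edges.1 ∧ segments_from_edges_alt (pvDiffWitness_segments_from_edges.1) (pvDiffWitness_segments_from_edges.2) = pvDiffWitnessOut_segments_from_edges.2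 ∧ pvDiffWitnessOut_segments_from_edges.1 ≠ pvDiffWitnessOut_segments_from_edges.2
def Claim_exact_segments_from_edges : Prop := ∀ (bars : List (List (String × Int))) (edge_ix : List Int), Dom_segments_from_edges bars edge_ix → Pre_segments_from_edges bars edge_ix → D_segments_from_edges bars edge_ix → segments_from_edges bars edge_ix ≠ segments_from_edges_alt bars edge_ix

-- ===== LEMMAS AND PROOFS =====

theorem aLoop_nil (bars : List (List (String × Int))) : aLoop bars [] = [] := by
  rw [aLoop.eq_def]

-- proof-side, accumulator-free form of the compression: (boundaries after the head, tail after the last boundary)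
def pComp (bars : List (List (String × Int))) (es : List Int) (cur : Option Int) : List Int × List Int :=
  match es with
  | [] => ([], [])
  | e :: rest =>
    if pvRdAt bars e ≠ cur then
      (e :: (pComp bars rest (pvRdAt bars e)).1, (pComp bars rest (pvRdAt bars e)).2)
    else if (pComp bars rest cur).1 = [] then ([], e :: (pComp bars rest cur).2)
    else pComp bars rest cur

theorem pComp_cons_eq (bars : List (List (String × Int))) (e : Int) (rest : List Int)
    (cur : Option Int) (hd : pvRdAt bars e = cur) :
    pComp bars (e :: rest) cur =
      if (pComp bars rest cur).1 = [] then ([], e :: (pComp bars rest cur).2)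
      else pComp bars rest cur := by
  simp [pComp, hd]

theorem pComp_cons_ne (bars : List (List (String × Int))) (e : Int) (rest : List Int)
    (cur : Option Int) (hd : pvRdAt bars e ≠ cur) :
    pComp bars (e :: rest) cur =
      (e :: (pComp bars rest (pvRdAt bars e)).1, (pComp bars rest (pvRdAt bars e)).2) := by
  simp [pComp, hd]

theorem bScan_eq (bars : List (List (String × Int))) (es : List Int) :
    ∀ (cur : Option Int) (bnds : List Int),
      bScan bars es cur bnds = bnds ++ (pComp bars es cur).1 := by
  induction es with
  | nil => intro cur bnds; simp [bScan, pComp]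
  | cons e rest ih =>
    intro cur bnds
    simp only [bScan, pComp]
    by_cases hd : pvRdAt bars e ≠ cur
    · rw [if_pos hd, if_pos hd, ih]
      simp
    · rw [if_neg hd, if_neg hd, ih]
      by_cases h1 : (pComp bars rest cur).1 = []
      · simp [h1]
      · simp [h1]

theorem aFindEnd_none_iff (bars : List (List (String × Int))) (es : List Int) (d : Option Int) :
    aFindEnd bars es d = none ↔ ∀ x ∈ es, pvRdAt bars x = d := by
  induction es with
  | nil => simp [aFindEnd]
  | cons e rest ih =>
    simp only [aFindEnd]
    by_cases hd : pvRdAt bars e ≠ d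
    · simp [hd]
    · push Not at hd
      simp [hd, ih]

theorem aFindEnd_some (bars : List (List (String × Int))) {es : List Int} {d : Option Int} {v : Int}
    (h : aFindEnd bars es d = some v) :
    ∃ pre suf, es = pre ++ v :: suf ∧ (∀ x ∈ pre, pvRdAt bars x = d) ∧ pvRdAt bars v ≠ d := by
  induction es with
  | nil => simp [aFindEnd] at h
  | cons e rest ih =>
    simp only [aFindEnd] at h
    split at h
    · rename_i hne
      cases h
      exact ⟨[], rest, by simp, by simp, hne⟩
    · rename_i hne
      push Not at hne
      obtain ⟨pre, suf, hsplit, hpre, hv⟩ := ih h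
      refine ⟨e :: pre, suf, by simp [hsplit], ?_, hv⟩
      intro x hx
      rcases List.mem_cons.mp hx with hx | hx
      · simpa [hx] using hne
      · exact hpre x hx

theorem pComp_const (bars : List (List (String × Int))) {es : List Int} {cur : Option Int}
    (h : ∀ x ∈ es, pvRdAt bars x = cur) : pComp bars es cur = ([], es) := by
  induction es with
  | nil => simp [pComp]
  | cons e rest ih =>
    have he : pvRdAt bars e = cur := h e (by simp)
    have hrest := ih (fun x hx => h x (by simp [hx]))
    simp [pComp, he, hrest]

theorem pComp_decomp (bars : List (List (String × Int))) {pre : List Int} {v : Int} (suf : List Int)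
    {d : Option Int} (hpre : ∀ x ∈ pre, pvRdAt bars x = d) (hv : pvRdAt bars v ≠ d) :
    pComp bars (pre ++ v :: suf) d =
      ((v :: (pComp bars suf (pvRdAt bars v)).1), (pComp bars suf (pvRdAt bars v)).2) := by
  induction pre with
  | nil => simp [pComp, hv]
  | cons x rest ih =>
    have hx : pvRdAt bars x = d := hpre x (by simp)
    have hrest := ih (fun y hy => hpre y (by simp [hy]))
    simp [pComp, hx, hrest]

theorem aNextK_decomp {pre : List Int} {v : Int} (suf : List Int)
    (hpre : ∀ x ∈ pre, x ≠ v) : aNextK (pre ++ v :: suf) v = v :: suf := by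
  induction pre with
  | nil => simp [aNextK]
  | cons x rest ih =>
    have hx : x ≠ v := hpre x (by simp)
    simp [aNextK, hx, ih (fun y hy => hpre y (by simp [hy]))]

theorem aNextK_none {es : List Int} {t : Int} (h : t ∉ es) : aNextK es t = [] := by
  induction es with
  | nil => simp [aNextK]
  | cons x rest ih =>
    have : x ≠ t := fun hx => h (by simp [hx])
    simp only [aNextK, if_neg this]
    exact ih (fun hm => h (by simp [hm]))

-- bars[a : len(bars)-1+1] is bars[a:]
theorem slice_to_len (bars : List (List (String × Int))) (a : Int) :
    PySem.List.slice bars (some a) (some (PySem.List.len bars - 1 + 1)) =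
      PySem.List.slice bars (some a) none := by
  have h : PySem.List.len bars - 1 + 1 = ((bars.length : Nat) : Int) := by
    simp [PySem.List.len_eq]
  rw [h]
  simp only [PySem.List.slice, Nat.cast_nonneg, Std.le_refl, PySem.List.clampIdx_of_nonneg_of_le,
    Int.toNat_natCast]

theorem pyGetD_neg_one_getLastD (l : List Int) (h : l ≠ []) :
    PySem.List.pyGetD l (-1) 0 = l.getLastD 0 := by
  rw [PySem.List.pyGetD_neg_one (xs := l) (d := 0) h, List.getLastD_eq_getLast?,
    List.getLast?_eq_some_getLast h]
  rfl

theorem bPairs_cons (bars : List (List (String × Int))) (a b : Int) (t : List Int) :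
    bPairs bars (a :: b :: t) =
      PySem.List.slice bars (some a) (some (b + 1)) :: bPairs bars (b :: t) := by
  simp [bPairs]

-- lastRun of e0 :: rest in terms of pComp: the last boundary followed by the trailing run
theorem lastRun_foldl (bars : List (List (String × Int))) :
    ∀ (es : List Int) (cur : Option Int) (acc : List Int), acc ≠ [] →
      (∀ x ∈ acc, pvRdAt bars x = cur) →
      es.foldl (lastRunStep bars) acc =
        (if (pComp bars es cur).1 = [] then acc
         else [(pComp bars es cur).1.getLastD 0]) ++ (pComp bars es cur).2 := by
  intro es
  induction es with
  | nil => intro cur acc h _; simp [pComp]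
  | cons e rest ih =>
    intro cur acc hne hall
    match acc, hne with
    | a :: at_, _ =>
      have ha : pvRdAt bars a = cur := hall a (by simp)
      simp only [List.foldl_cons, lastRunStep]
      by_cases hd : pvRdAt bars e = cur
      · rw [if_pos (by rw [hd, ha])]
        have h2 : ∀ x ∈ (a :: at_) ++ [e], pvRdAt bars x = cur := by
          intro x hx
          rcases List.mem_append.mp hx with hx | hx
          · exact hall x hx
          · simp at hx; rw [hx, hd]
        rw [ih cur ((a :: at_) ++ [e]) (by simp) h2]
        rw [pComp_cons_eq bars e rest cur hd]
        by_cases h1 : (pComp bars rest cur).1 = []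
        · simp [h1]
        · simp [h1]
      · rw [if_neg (by rw [ha]; exact hd)]
        have h2 : ∀ x ∈ [e], pvRdAt bars x = pvRdAt bars e := by simp
        rw [ih (pvRdAt bars e) [e] (by simp) h2]
        rw [pComp_cons_ne bars e rest cur hd]
        by_cases h1 : (pComp bars rest (pvRdAt bars e)).1 = []
        · simp [h1]
        · simp only [if_neg (by simp : ¬(e :: (pComp bars rest (pvRdAt bars e)).1 = [])),
            if_neg h1]
          congr 2
          match (pComp bars rest (pvRdAt bars e)).1, h1 with
          | y :: ys, _ => simp

theorem lastRun_eq (bars : List (List (String × Int))) (e0 : Int) (rest : List Int) :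
    lastRun bars (e0 :: rest) =
      (e0 :: (pComp bars rest (pvRdAt bars e0)).1).getLastD 0
        :: (pComp bars rest (pvRdAt bars e0)).2 := by
  unfold lastRun
  simp only [List.foldl_cons, lastRunStep]
  rw [lastRun_foldl bars rest (pvRdAt bars e0) [e0] (by simp) (by simp)]
  by_cases h1 : (pComp bars rest (pvRdAt bars e0)).1 = []
  · simp [h1]
  · simp only [if_neg h1, List.cons_append, List.nil_append]
    congr 1
    match (pComp bars rest (pvRdAt bars e0)).1, h1 with
    | y :: ys, _ => simp

-- tail phase of A on a constant-direction run
def bJump (es : List Int) (target : Int) : Option (List Int) :=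
  match es with
  | [] => none
  | x :: rest => if x = target then some (x :: rest) else bJump rest target

theorem aNextK_eq_bJump (es : List Int) (t : Int) :
    aNextK es t = (bJump es t).getD [] := by
  induction es with
  | nil => simp [aNextK, bJump]
  | cons x rest ih =>
    simp only [aNextK, bJump]
    split
    · simp
    · simpa using ih

theorem bJump_mem {es : List Int} {t : Int} (h : t ∈ es) :
    ∃ s, bJump es t = some (t :: s) := by
  induction es with
  | nil => simp at h
  | cons x rest ih =>
    by_cases hx : x = t
    · subst hx; exact ⟨rest, by simp [bJump]⟩
    · rcases List.mem_cons.mp h with h' | h'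
      · exact absurd h'.symm hx
      · obtain ⟨s, hs⟩ := ih h'
        exact ⟨s, by simp [bJump, hx, hs]⟩

-- A's loop on a constant-direction run (the tail phase)
theorem tail_const (bars : List (List (String × Int))) :
    ∀ (n : Nat) (es : List Int) (c : Option Int), es.length ≤ n →
      (∀ x ∈ es, pvRdAt bars x = c) →
      aLoop bars es =
        match es with
        | [] => []
        | e :: rest =>
          if PySem.List.len bars - 1 = e then
            PySem.List.slice bars (some e) (some (PySem.List.len bars - 1 + 1)) :: aLoop bars rest
          else
            PySem.List.slice bars (some e) (some (PySem.List.len bars - 1 + 1)) ::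
              aLoop bars (aNextK rest (PySem.List.len bars - 1)) := by
  intro n es c hlen hc
  match es with
  | [] => simp [aLoop]
  | e :: rest =>
    have hrest : ∀ x ∈ rest, pvRdAt bars x = c := fun x hx => hc x (by simp [hx])
    have hfe : aFindEnd bars rest (pvRdAt bars e) = none := by
      rw [aFindEnd_none_iff]
      intro x hx
      rw [hrest x hx, hc e (by simp)]
    rw [aLoop]
    simp only [hfe]

-- ¬D_ case: A's tail phase on run b :: tail produces exactly [bars[b:]]
theorem tail_noD (bars : List (List (String × Int))) (b : Int) (tl : List Int) (c : Option Int)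
    (hc : ∀ x ∈ b :: tl, pvRdAt bars x = c)
    (hnb : tl = [] ∨ (b ≠ PySem.List.len bars - 1 ∧ (PySem.List.len bars - 1) ∉ tl)) :
    aLoop bars (b :: tl) = [PySem.List.slice bars (some b) none] := by
  rcases hnb with htl | ⟨hb, hmem⟩
  · subst htl
    rw [tail_const bars 1 [b] c (by simp) hc]
    by_cases hbe : PySem.List.len bars - 1 = b
    · simp only [if_pos hbe, aLoop]
      rw [← hbe, slice_to_len]
    · simp only [if_neg hbe, aNextK, aLoop]
      rw [slice_to_len]
  · rw [tail_const bars (tl.length + 1) (b :: tl) c (by simp) hc]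
    simp only [if_neg (fun h : PySem.List.len bars - 1 = b => hb h.symm)]
    rw [aNextK_none hmem, slice_to_len]
    simp [aLoop]

-- D_ case: A's tail phase on run b :: tail produces at least two segments
theorem aLoop_ne_nil (bars : List (List (String × Int))) (e : Int) (rest : List Int) :
    aLoop bars (e :: rest) ≠ [] := by
  rw [aLoop]
  split <;> split <;> simp

theorem tail_D (bars : List (List (String × Int))) (b : Int) (tl : List Int) (c : Option Int)
    (hc : ∀ x ∈ b :: tl, pvRdAt bars x = c)
    (htl : tl ≠ []) (hmem : b = PySem.List.len bars - 1 ∨ (PySem.List.len bars - 1) ∈ tl) :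
    2 ≤ (aLoop bars (b :: tl)).length := by
  rw [tail_const bars (tl.length + 1) (b :: tl) c (by simp) hc]
  by_cases hbe : PySem.List.len bars - 1 = b
  · simp only [if_pos hbe, List.length_cons]
    match tl, htl with
    | t :: ts, _ =>
      have := aLoop_ne_nil bars t ts
      have : 1 ≤ (aLoop bars (t :: ts)).length := Nat.one_le_iff_ne_zero.mpr (by simpa using this)
      omega
  · have hm : (PySem.List.len bars - 1) ∈ tl := by
      rcases hmem with h | h
      · exact absurd h.symm hbe
      · exact h
    obtain ⟨s, hs⟩ := bJump_mem hm
    simp only [if_neg hbe, List.length_cons, aNextK_eq_bJump, hs, Option.getD_some]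
    have := aLoop_ne_nil bars (PySem.List.len bars - 1) s
    have : 1 ≤ (aLoop bars ((PySem.List.len bars - 1) :: s)).length :=
      Nat.one_le_iff_ne_zero.mpr (by simpa using this)
    omega

-- main invariant: A's loop from a boundary = boundary-pair segments ++ A's tail phase on the last run
theorem main_eq (bars : List (List (String × Int))) :
    ∀ (n : Nat) (es : List Int) (e : Int), es.length ≤ n →
      aLoop bars (e :: es) =
        bPairs bars (e :: (pComp bars es (pvRdAt bars e)).1) ++
          aLoop bars ((e :: (pComp bars es (pvRdAt bars e)).1).getLastD 0
                      :: (pComp bars es (pvRdAt bars e)).2) := by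
  intro n
  induction n with
  | zero =>
    intro es e hlen
    have : es = [] := List.eq_nil_of_length_eq_zero (Nat.le_zero.mp hlen)
    subst this
    simp [pComp, bPairs]
  | succ m ih =>
    intro es e hlen
    match hfe : aFindEnd bars es (pvRdAt bars e) with
    | none =>
      have hall : ∀ x ∈ es, pvRdAt bars x = pvRdAt bars e := (aFindEnd_none_iff _ _ _).mp hfe
      rw [pComp_const bars hall]
      simp [bPairs]
    | some v =>
      obtain ⟨pre, suf, hsplit, hpre, hv⟩ := aFindEnd_some bars hfe
      subst hsplit
      have hq := pComp_decomp bars suf hpre hv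
      have hne : v ≠ e := by
        intro h
        exact hv (by rw [h])
      have hnk : aNextK (pre ++ v :: suf) v = v :: suf :=
        aNextK_decomp suf (fun x hx heq => hv (heq ▸ hpre x hx))
      have hlen' : suf.length ≤ m := by
        simp [List.length_append] at hlen
        omega
      rw [aLoop]
      simp only [hfe, if_neg hne]
      rw [hnk, ih suf v hlen', hq]
      rw [bPairs_cons]
      simp

-- A in boundary form
theorem A_char (bars : List (List (String × Int))) (e0 : Int) (rest : List Int) :
    segments_from_edges bars (e0 :: rest) =
      bPairs bars (e0 :: (pComp bars rest (pvRdAt bars e0)).1) ++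
        aLoop bars ((e0 :: (pComp bars rest (pvRdAt bars e0)).1).getLastD 0
                    :: (pComp bars rest (pvRdAt bars e0)).2) := by
  show aLoop bars (e0 :: rest) = _
  exact main_eq bars rest.length rest e0 (Nat.le_refl _)

-- B in boundary form
theorem B_char (bars : List (List (String × Int))) (e0 : Int) (rest : List Int) :
    segments_from_edges_alt bars (e0 :: rest) =
      bPairs bars (e0 :: (pComp bars rest (pvRdAt bars e0)).1) ++
        [PySem.List.slice bars
          (some ((e0 :: (pComp bars rest (pvRdAt bars e0)).1).getLastD 0)) none] := by
  simp only [segments_from_edges_alt]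
  rw [bScan_eq]
  simp only [List.cons_append, List.nil_append]
  rw [pyGetD_neg_one_getLastD _ (by simp)]

-- the last boundary and trailing run all share one direction
theorem run_const (bars : List (List (String × Int))) (e0 : Int) (rest : List Int) :
    ∀ x ∈ (e0 :: (pComp bars rest (pvRdAt bars e0)).1).getLastD 0
            :: (pComp bars rest (pvRdAt bars e0)).2,
      pvRdAt bars x =
        pvRdAt bars ((e0 :: (pComp bars rest (pvRdAt bars e0)).1).getLastD 0) := by
  have key : ∀ (es : List Int) (e : Int),
      ∀ x ∈ (pComp bars es (pvRdAt bars e)).2,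
        pvRdAt bars x = pvRdAt bars ((e :: (pComp bars es (pvRdAt bars e)).1).getLastD 0) := by
    intro es
    induction es with
    | nil => intro e x hx; simp [pComp] at hx
    | cons f rest ih =>
      intro e x hx
      by_cases hd : pvRdAt bars f ≠ pvRdAt bars e
      · rw [pComp_cons_ne bars f rest (pvRdAt bars e) hd] at hx ⊢
        have := ih f x hx
        simpa using this
      · push Not at hd
        rw [pComp_cons_eq bars f rest (pvRdAt bars e) hd] at hx ⊢
        by_cases h1 : (pComp bars rest (pvRdAt bars e)).1 = []
        · simp only [if_pos h1] at hx ⊢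
          rcases List.mem_cons.mp hx with hx | hx
          · rw [hx, hd]; simp
          · have := ih e x hx
            simpa [h1] using this
        · simp only [if_neg h1] at hx ⊢
          have := ih e x hx
          simpa [h1] using this
  intro x hx
  rcases List.mem_cons.mp hx with hx | hx
  · rw [hx]
  · exact key rest e0 x hx

theorem segments_eq_noD (bars : List (List (String × Int))) (edge_ix : List Int)
    (hnd : ¬ D_segments_from_edges bars edge_ix) :
    segments_from_edges bars edge_ix = segments_from_edges_alt bars edge_ix := by
  match edge_ix with
  | [] => rfl
  | e0 :: rest =>
    rw [A_char, B_char]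
    congr 1
    set b := (e0 :: (pComp bars rest (pvRdAt bars e0)).1).getLastD 0 with hb
    set tl := (pComp bars rest (pvRdAt bars e0)).2 with htl
    have hrun : lastRun bars (e0 :: rest) = b :: tl := lastRun_eq bars e0 rest
    unfold D_segments_from_edges at hnd
    rw [hrun] at hnd
    push Not at hnd
    refine tail_noD bars b tl (pvRdAt bars b) (run_const bars e0 rest) ?_
    by_cases htl0 : tl = []
    · exact Or.inl htl0
    · right
      have hlen : 2 ≤ (b :: tl).length := by
        match tl, htl0 with
        | t :: ts, _ => simp
      have := hnd hlen
      constructor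
      · intro hbe
        exact this (List.mem_cons.mpr (Or.inl hbe.symm))
      · intro hm
        exact this (List.mem_cons.mpr (Or.inr hm))

theorem segments_ne_D (bars : List (List (String × Int))) (edge_ix : List Int)
    (hd : D_segments_from_edges bars edge_ix) :
    segments_from_edges bars edge_ix ≠ segments_from_edges_alt bars edge_ix := by
  match edge_ix with
  | [] =>
    exfalso
    unfold D_segments_from_edges lastRun at hd
    simp at hd
  | e0 :: rest =>
    rw [A_char, B_char]
    set b := (e0 :: (pComp bars rest (pvRdAt bars e0)).1).getLastD 0 with hb
    set tl := (pComp bars rest (pvRdAt bars e0)).2 with htl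
    have hrun : lastRun bars (e0 :: rest) = b :: tl := lastRun_eq bars e0 rest
    unfold D_segments_from_edges at hd
    rw [hrun] at hd
    obtain ⟨hlen, hmem⟩ := hd
    have htl0 : tl ≠ [] := by
      intro h
      rw [h] at hlen
      simp at hlen
    have h2 : 2 ≤ (aLoop bars (b :: tl)).length := by
      refine tail_D bars b tl (pvRdAt bars b) (run_const bars e0 rest) htl0 ?_
      rcases List.mem_cons.mp hmem with h | h
      · exact Or.inl h.symm
      · exact Or.inr h
    intro heq
    have := congrArg List.length heq
    simp only [List.length_append, List.length_cons, List.length_nil] at this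
    omega

-- ===== VERDICT (by name: the statements are the Claim_ definitions above) =====
theorem segments_from_edges_spec : Claim_unchanged_segments_from_edges := by
  intro bars edge_ix _ _ hnd
  exact segments_eq_noD bars edge_ix hnd

theorem segments_from_edges_changed : Claim_changed_segments_from_edges := by
  unfold Claim_changed_segments_from_edges
  refine ⟨by decide, by decide, by decide, ?_, by decide, by decide⟩
  show segments_from_edges [[("revDir", 1)], [("revDir", 1)]] [0, 1] = _
  show aLoop [[("revDir", 1)], [("revDir", 1)]] [0, 1] = _
  rw [aLoop.eq_def]
  norm_num [aFindEnd, aNextK, pvRdAt, pvRevDir, PySem.List.pyGet?, PySem.List.pyIdx?,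
    PySem.Dict.get?, PySem.Dict.mk, PySem.List.len_eq, aLoop_nil]
  rw [aLoop.eq_def]
  norm_num [aFindEnd, aNextK, pvRdAt, pvRevDir, PySem.List.pyGet?, PySem.List.pyIdx?,
    PySem.Dict.get?, PySem.Dict.mk, PySem.List.len_eq, aLoop_nil]
  decide

theorem segments_from_edges_tight : Claim_exact_segments_from_edges := by
  intro bars edge_ix _ _ hd
  exact segments_ne_D bars edge_ix hd
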